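-- pv_equiv track=rewrite | github.com/vishal9359/Flowchart | enrichment/enricher.py | _extract_inline_comment
-- ===== SOURCE A (Python) =====
-- def _extract_inline_comment(line: str) -> str:
--     """Extract a trailing // comment from a source line."""
--     # Skip string literals to avoid false positives
--     in_str = False
--     i = 0
--     while i < len(line) - 1:
--         if line[i] == '"' and (i == 0 or line[i - 1] != "\\"):
--             in_str = not in_str
--         if not in_str and line[i] == "/" and line[i + 1] == "/":
--             return line[i + 2:].strip()
--         i += 1
--     return ""
-- ===== SOURCE B (Python) =====
-- def _extract_inline_comment(line: str) -> str:
--     """Extract a trailing // comment from a source line (two-pass version)."""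
--     # Pass 1: precompute the string-literal flag AFTER the toggle at each index.
--     flags = []
--     state = False
--     for j, ch in enumerate(line):
--         if ch == '"' and (j == 0 or line[j - 1] != "\\"):
--             state = not state
--         flags.append(state)
--     # Pass 2: first '//' outside a string literal (last index never starts one).
--     for i in range(len(line) - 1):
--         if not flags[i] and line[i] == "/" and line[i + 1] == "/":
--             return line[i + 2:].strip()
--     return ""
-- ===== Notes on version B (the rewrite author's own statement) =====
-- stated objective: alternative
-- what changed: Replaces the single stateful while-loop by two passes: a first pass precomputes the string-literal flag for every index into an array, then a second index loop just looks the flag up to find the first comment marker outside a string literal.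
import Mathlib
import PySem

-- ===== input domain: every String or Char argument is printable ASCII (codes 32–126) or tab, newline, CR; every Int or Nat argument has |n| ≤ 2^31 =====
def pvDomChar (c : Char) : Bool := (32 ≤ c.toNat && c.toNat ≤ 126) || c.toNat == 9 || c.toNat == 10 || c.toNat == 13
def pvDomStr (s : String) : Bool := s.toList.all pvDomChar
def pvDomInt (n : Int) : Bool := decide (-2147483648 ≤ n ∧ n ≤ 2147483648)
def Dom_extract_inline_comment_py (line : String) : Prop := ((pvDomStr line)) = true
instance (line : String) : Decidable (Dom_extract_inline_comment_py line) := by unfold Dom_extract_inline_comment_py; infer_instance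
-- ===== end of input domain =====

-- B replaces A's single stateful while-loop by two passes (precomputed flag array, then an index scan); objective: alternative decomposition, same cost.

-- ===== PORT A =====
-- the while-loop: index i, running in_str state
def pvALoop (l : List Char) (inStr : Bool) (i : Nat) : String :=
  if i < l.length - 1 then
    let inStr' := if l.getD i ' ' = '"' ∧ (i = 0 ∨ l.getD (i - 1) ' ' ≠ '\\') then !inStr else inStr
    if inStr' = false ∧ l.getD i ' ' = '/' ∧ l.getD (i + 1) ' ' = '/' then
      PySem.Str.strip (String.ofList (l.drop (i + 2)))
    else
      pvALoop l inStr' (i + 1)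
  else ""
termination_by l.length - i

def extract_inline_comment_py (line : String) : String :=
  pvALoop line.toList false 0

-- ===== PORT B =====
-- Pass 1 of Source B: the flag AFTER the toggle at each index; prev = line[j-1] (none at j = 0)
def pvFlags (prev : Option Char) (state : Bool) : List Char → List Bool
  | [] => []
  | c :: rest =>
    let state' := if c = '"' ∧ prev ≠ some '\\' then !state else state
    state' :: pvFlags (some c) state' rest

-- Pass 2 of Source B: first index i < len-1 with flag false and '//'
def pvBScan (l : List Char) (flags : List Bool) (i : Nat) : String :=
  if i < l.length - 1 then
    if flags.getD i false = false ∧ l.getD i ' ' = '/' ∧ l.getD (i + 1) ' ' = '/' then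
      PySem.Str.strip (String.ofList (l.drop (i + 2)))
    else
      pvBScan l flags (i + 1)
  else ""
termination_by l.length - i

def extract_inline_comment_py_alt (line : String) : String :=
  pvBScan line.toList (pvFlags none false line.toList) 0

-- ===== PRECONDITION & SPEC =====
def Spec_extract_inline_comment_py (line : String) (out : String) : Prop := out = extract_inline_comment_py_alt line
instance (line : String) (out : String) : Decidable (Spec_extract_inline_comment_py line out) := by unfold Spec_extract_inline_comment_py; infer_instance

-- ===== CLAIM (what is proved, stated in full; the proofs are below) =====
def Claim_equal_extract_inline_comment_py : Prop := ∀ (line : String), Dom_extract_inline_comment_py line → Spec_extract_inline_comment_py line (extract_inline_comment_py line)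

-- ===== LEMMAS AND PROOFS =====

-- step characterisation of the flag at index i, relative to the flag at i-1
theorem pvFlags_getD_step (xs : List Char) (prev : Option Char) (s : Bool) (i : Nat)
    (hi : i < xs.length) :
    (pvFlags prev s xs).getD i false =
      (if xs.getD i ' ' = '"' ∧
           ((if i = 0 then prev else some (xs.getD (i - 1) ' ')) ≠ some '\\') then
        !(if i = 0 then s else (pvFlags prev s xs).getD (i - 1) false)
      else (if i = 0 then s else (pvFlags prev s xs).getD (i - 1) false)) := by
  induction xs generalizing prev s i with
  | nil => simp at hi
  | cons c rest ih =>
    cases i with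
    | zero => simp [pvFlags]
    | succ j =>
      have hj : j < rest.length := by simpa using hi
      have := ih (some c) (if c = '"' ∧ prev ≠ some '\\' then !s else s) j hj
      cases j with
      | zero =>
        simpa [pvFlags] using this
      | succ k =>
        simpa [pvFlags] using this

-- the loops agree: A's running state before index i is B's flag at i-1
theorem pvLoop_eq (l : List Char) (i : Nat) (s : Bool)
    (hs : s = (if i = 0 then false else (pvFlags none false l).getD (i - 1) false)) :
    pvALoop l s i = pvBScan l (pvFlags none false l) i := by
  by_cases h : i < l.length - 1
  · have hi : i < l.length := by omega
    have hstep := pvFlags_getD_step l none false i hi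
    have hflag : (pvFlags none false l).getD i false =
        (if l.getD i ' ' = '"' ∧ (i = 0 ∨ l.getD (i - 1) ' ' ≠ '\\') then !s else s) := by
      rw [hstep, hs]
      by_cases h0 : i = 0 <;> simp [h0]
    rw [pvALoop, pvBScan]
    simp only [h, if_pos]
    rw [← hflag]
    split_ifs with hc
    · rfl
    · exact pvLoop_eq l (i + 1) _ (by simp)
  · rw [pvALoop, pvBScan]; simp [h]
termination_by l.length - i

-- ===== VERDICT (by name: the statement is the Claim_ definition above) =====
theorem extract_inline_comment_py_spec : Claim_equal_extract_inline_comment_py := by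
  intro line _
  unfold Spec_extract_inline_comment_py extract_inline_comment_py extract_inline_comment_py_alt
  exact pvLoop_eq line.toList 0 false (by simp)
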